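-- pv_equiv track=rewrite | github.com/c23mj/advent-of-code-2024 | day-9-disk-fragmenter/day9.py | move_partial
-- ===== SOURCE A (Python) =====
-- def move_partial(disk, order):
--     n = len(order)
--     i, j = 0, n - 1
--     moved = []
--     for k in range(n):
--         if isinstance(disk[k], int):
--             moved.append(order[i])
--             i += 1
--         else:
--             moved.append(order[j])
--             j -= 1
--     return moved
-- ===== SOURCE B (Python) =====
-- def move_partial(disk, order):
--     n = len(order)
--     ints = [k for k in range(n) if isinstance(disk[k], int)]
--     others = [k for k in range(n) if not isinstance(disk[k], int)]
--     moved = [None] * n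
--     for idx, k in enumerate(ints):
--         moved[k] = order[idx]
--     for idx, k in enumerate(others):
--         moved[k] = order[n - 1 - idx]
--     return moved
-- ===== Notes on version B (the rewrite author's own statement) =====
-- stated objective: alternative
-- what changed: Replaces the single interleaved two-pointer pass with two classification passes over the indices plus positional scatter-assignment into a preallocated output list.
import Mathlib
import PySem

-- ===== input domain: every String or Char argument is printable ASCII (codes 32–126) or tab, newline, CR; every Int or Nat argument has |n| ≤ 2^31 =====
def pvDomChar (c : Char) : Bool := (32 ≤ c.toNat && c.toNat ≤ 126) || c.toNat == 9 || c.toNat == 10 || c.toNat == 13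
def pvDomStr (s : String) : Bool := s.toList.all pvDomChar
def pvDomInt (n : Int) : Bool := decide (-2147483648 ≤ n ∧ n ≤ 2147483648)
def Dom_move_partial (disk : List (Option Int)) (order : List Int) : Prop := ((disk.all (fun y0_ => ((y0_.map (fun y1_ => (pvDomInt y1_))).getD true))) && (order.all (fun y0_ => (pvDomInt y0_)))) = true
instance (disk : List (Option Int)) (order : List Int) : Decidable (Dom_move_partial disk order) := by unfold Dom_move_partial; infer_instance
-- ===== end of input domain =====

-- B replaces A's single interleaved two-pointer pass by two classification passes over the
-- indices plus positional scatter-assignment into a preallocated output list (objective: alternative).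

-- ===== PORT A =====
-- literal port of A: fold over range(n) with state (i, j, moved); disk[k]/order[i]/order[j]
-- via pyGetD (defaults unreachable under Pre_, which excludes the IndexError inputs).
def move_partial (disk : List (Option Int)) (order : List Int) : List Int :=
  let n : Int := (order.length : Int)
  ((PySem.List.pyRange 0 n 1).foldl
    (fun (st : Int × Int × List Int) (k : Int) =>
      if (PySem.List.pyGetD disk k none).isSome then
        (st.1 + 1, st.2.1, st.2.2 ++ [PySem.List.pyGetD order st.1 0])
      else
        (st.1, st.2.1 - 1, st.2.2 ++ [PySem.List.pyGetD order st.2.1 0]))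
    ((0 : Int), n - 1, ([] : List Int))).2.2

-- ===== PORT B =====
-- literal port of Source B: ints/others classification, then scatter writes into [None]*n
-- (modelled as a list of 0s: every slot is overwritten since ints ∪ others covers range n).
def move_partial_alt (disk : List (Option Int)) (order : List Int) : List Int :=
  let n : Nat := order.length
  let ints : List Int := (PySem.List.pyRange 0 (n : Int) 1).filter
    (fun k => (PySem.List.pyGetD disk k none).isSome)
  let others : List Int := (PySem.List.pyRange 0 (n : Int) 1).filter
    (fun k => !(PySem.List.pyGetD disk k none).isSome)
  let m0 : List Int := List.replicate n 0
  let m1 := (PySem.List.enumerate ints 0).foldl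
    (fun m p => PySem.List.pySetD m p.2 (PySem.List.pyGetD order p.1 0)) m0
  (PySem.List.enumerate others 0).foldl
    (fun m p => PySem.List.pySetD m p.2 (PySem.List.pyGetD order ((n : Int) - 1 - p.1) 0)) m1

-- ===== PRECONDITION & SPEC =====
-- Pre_ excludes exactly the inputs where Python A raises IndexError: disk shorter than order
-- (the loop reads disk[k] for every k < len(order)). B raises there too.
def Pre_move_partial (disk : List (Option Int)) (order : List Int) : Prop :=
  order.length ≤ disk.length
instance (disk : List (Option Int)) (order : List Int) : Decidable (Pre_move_partial disk order) := by unfold Pre_move_partial; infer_instance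
def pvWitness_move_partial : List (Option Int) × List Int := ([some 1, none, some 2], [10, 20, 30])
def Spec_move_partial (disk : List (Option Int)) (order : List Int) (out : List Int) : Prop := out = move_partial_alt disk order
instance (disk : List (Option Int)) (order : List Int) (out : List Int) : Decidable (Spec_move_partial disk order out) := by unfold Spec_move_partial; infer_instance

-- ===== CLAIM (what is proved, stated in full; the proofs are below) =====
def Claim_equal_move_partial : Prop := ∀ (disk : List (Option Int)) (order : List Int), Dom_move_partial disk order → Pre_move_partial disk order → Spec_move_partial disk order (move_partial disk order)

-- ===== LEMMAS AND PROOFS =====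

-- the int-slot test, prefix counts of int / non-int slots, and the pointwise value both programs compute
def pvQ (disk : List (Option Int)) (k : Nat) : Bool := (disk.getD k none).isSome
def pvCnt (disk : List (Option Int)) (k : Nat) : Nat := (List.range k).countP (pvQ disk)
def pvCntN (disk : List (Option Int)) (k : Nat) : Nat := (List.range k).countP (fun j => !pvQ disk j)
def pvF (disk : List (Option Int)) (order : List Int) (k : Nat) : Int :=
  if pvQ disk k then order.getD (pvCnt disk k) 0
  else order.getD (order.length - 1 - pvCntN disk k) 0

-- Nat-level form of B's scatter loops
def pvScat (g : Int → Int) : List Nat → Nat → List Int → List Int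
  | [], _, m => m
  | t :: ts, s, m => pvScat g ts (s + 1) (m.set t (g (s : Int)))

theorem pvScat_length (g : Int → Int) (ts : List Nat) (s : Nat) (m : List Int) :
    (pvScat g ts s m).length = m.length := by
  induction ts generalizing s m with
  | nil => rfl
  | cons t ts ih => simp [pvScat, ih]

theorem pvScat_bridge (g : Int → Int) (ts : List Nat) (s : Nat) (m : List Int) :
    (PySem.List.enumerate (ts.map (fun t => ((t : Nat) : Int))) (s : Int)).foldl
      (fun m p => PySem.List.pySetD m p.2 (g p.1)) m = pvScat g ts s m := by
  induction ts generalizing s m with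
  | nil => simp [pvScat]
  | cons t ts ih =>
      simp only [List.map_cons, PySem.List.enumerate_cons, List.foldl_cons,
        PySem.List.pySetD_natCast, pvScat]
      have h1 : (s : Int) + 1 = ((s + 1 : Nat) : Int) := by push_cast; ring
      rw [h1, ih]

theorem pvScat_bridge0 (g : Int → Int) (ts : List Nat) (m : List Int) :
    (PySem.List.enumerate (ts.map (fun t => ((t : Nat) : Int))) 0).foldl
      (fun m p => PySem.List.pySetD m p.2 (g p.1)) m = pvScat g ts 0 m := by
  simpa using pvScat_bridge g ts 0 m

theorem pvScat_get_not_mem (g : Int → Int) (ts : List Nat) (s : Nat) (m : List Int)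
    (k : Nat) (hk : k ∉ ts) :
    (pvScat g ts s m)[k]? = m[k]? := by
  induction ts generalizing s m with
  | nil => rfl
  | cons t ts ih =>
      simp only [List.mem_cons, not_or] at hk
      rw [pvScat, ih _ _ hk.2, List.getElem?_set_ne (Ne.symm hk.1)]

theorem pvScat_get_mem (g : Int → Int) (ts : List Nat) (s : Nat) (m : List Int)
    (k : Nat) (hnd : ts.Nodup) (hmem : k ∈ ts) (hk : k < m.length) :
    (pvScat g ts s m)[k]? = some (g ((s + ts.idxOf k : Nat) : Int)) := by
  induction ts generalizing s m with
  | nil => simp at hmem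
  | cons t ts ih =>
      rcases List.nodup_cons.mp hnd with ⟨htn, hnd'⟩
      by_cases h : t = k
      · subst h
        rw [pvScat, pvScat_get_not_mem _ _ _ _ _ htn]
        simp [hk]
      · rcases List.mem_cons.mp hmem with h' | h'
        · exact absurd h'.symm h
        · rw [pvScat, ih _ _ hnd' h' (by simpa using hk)]
          have : (t :: ts).idxOf k = ts.idxOf k + 1 := by
            simp [h]
          rw [this]
          congr 2
          omega

-- position of k in the filtered index list = prefix count below k
theorem pvIdxOf_filter_range (q : Nat → Bool) (n k : Nat) (hk : k < n) (hq : q k = true) :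
    ((List.range n).filter q).idxOf k = (List.range k).countP q := by
  obtain ⟨m, rfl⟩ : ∃ m, n = k + (m + 1) := ⟨n - k - 1, by omega⟩
  rw [List.range_add, List.filter_append, List.idxOf_append]
  have hnotmem : k ∉ (List.range k).filter q := by
    intro h
    have := List.mem_range.mp (List.mem_of_mem_filter h)
    omega
  rw [if_neg hnotmem]
  have : (List.range (m + 1)).map (fun x => k + x) = k :: (List.range m).map (fun x => k + (x + 1)) := by
    rw [List.range_succ_eq_map]
    simp [List.map_map, Function.comp]
  rw [this]
  simp [hq, List.countP_eq_length_filter]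

theorem pvCntN_le (disk : List (Option Int)) (k : Nat) : pvCntN disk k ≤ k := by
  have := List.countP_le_length (p := fun j => !pvQ disk j) (l := List.range k)
  simpa [pvCntN] using this

-- A's loop invariant: after m steps the state is (cnt m, n-1-cntN m, first m outputs)
theorem pvAfold (disk : List (Option Int)) (order : List Int) (m : Nat) (hm : m ≤ order.length) :
    ((List.range m).map (fun k => ((k : Nat) : Int))).foldl
      (fun (st : Int × Int × List Int) (k : Int) =>
        if (PySem.List.pyGetD disk k none).isSome then
          (st.1 + 1, st.2.1, st.2.2 ++ [PySem.List.pyGetD order st.1 0])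
        else
          (st.1, st.2.1 - 1, st.2.2 ++ [PySem.List.pyGetD order st.2.1 0]))
      ((0 : Int), (order.length : Int) - 1, ([] : List Int))
    = ((pvCnt disk m : Int), (order.length : Int) - 1 - (pvCntN disk m : Int),
        (List.range m).map (pvF disk order)) := by
  induction m with
  | zero => simp [pvCnt, pvCntN]
  | succ m ih =>
      have hm' : m ≤ order.length := by omega
      rw [List.range_succ, List.map_append, List.foldl_append, ih hm']
      simp only [List.map_cons, List.map_nil, List.foldl_cons, List.foldl_nil]
      have hcnt : pvCnt disk (m + 1) = pvCnt disk m + (if pvQ disk m then 1 else 0) := by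
        simp [pvCnt, List.range_succ, List.countP_append, List.countP_cons]
      have hcntN : pvCntN disk (m + 1) = pvCntN disk m + (if pvQ disk m then 0 else 1) := by
        by_cases h : pvQ disk m <;>
          simp [pvCntN, List.range_succ, List.countP_append, h]
      have hq : (PySem.List.pyGetD disk ((m : Nat) : Int) none).isSome = pvQ disk m := by
        rw [PySem.List.pyGetD_natCast]; rfl
      by_cases h : pvQ disk m
      · rw [if_pos (by rw [hq]; exact h)]
        refine Prod.ext ?_ (Prod.ext ?_ ?_)
        · rw [hcnt, if_pos h]; push_cast; ring
        · rw [hcntN, if_pos h]; simp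
        · simp only [List.map_append, List.map_cons, List.map_nil]
          congr 1
          rw [PySem.List.pyGetD_natCast]
          simp [pvF, h]
      · rw [if_neg (by rw [hq]; simp [h])]
        refine Prod.ext ?_ (Prod.ext ?_ ?_)
        · rw [hcnt, if_neg h]; simp
        · rw [hcntN, if_neg h]; push_cast; ring
        · simp only [List.map_append, List.map_cons, List.map_nil]
          congr 1
          have hle : pvCntN disk m ≤ m := pvCntN_le disk m
          have hcast : (order.length : Int) - 1 - (pvCntN disk m : Int)
              = ((order.length - 1 - pvCntN disk m : Nat) : Int) := by omega
          rw [hcast, PySem.List.pyGetD_natCast]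
          simp [pvF, h]

-- A computes the pointwise value pvF at every index
theorem pvA_eq_map (disk : List (Option Int)) (order : List Int) :
    move_partial disk order = (List.range order.length).map (pvF disk order) := by
  simp only [move_partial]
  rw [PySem.List.pyRange_zero_nat]
  rw [pvAfold disk order order.length le_rfl]

-- B computes the same pointwise value
theorem pvB_eq_map (disk : List (Option Int)) (order : List Int) :
    move_partial_alt disk order = (List.range order.length).map (pvF disk order) := by
  simp only [move_partial_alt]
  rw [PySem.List.pyRange_zero_nat]
  rw [List.filter_map, List.filter_map]
  have hq : ∀ k : Nat, ((PySem.List.pyGetD disk ((k : Nat) : Int) none).isSome) = pvQ disk k := by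
    intro k; rw [PySem.List.pyGetD_natCast]; rfl
  have hints : (List.filter ((fun k => (PySem.List.pyGetD disk k none).isSome) ∘ fun k : Nat => (k : Int)) (List.range order.length)) = (List.range order.length).filter (pvQ disk) := by
    apply List.filter_congr; intro x _; simpa using hq x
  have hothers : (List.filter ((fun k => !(PySem.List.pyGetD disk k none).isSome) ∘ fun k : Nat => (k : Int)) (List.range order.length)) = (List.range order.length).filter (fun k => !pvQ disk k) := by
    apply List.filter_congr; intro x _; simp only [Function.comp_apply]; rw [hq x]
  rw [hints, hothers]
  rw [pvScat_bridge0 (fun i => PySem.List.pyGetD order ((order.length : Int) - 1 - i) 0),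
    pvScat_bridge0 (fun i => PySem.List.pyGetD order i 0)]
  set n := order.length with hn
  set ints := (List.range n).filter (pvQ disk) with hi
  set others := (List.range n).filter (fun k => !pvQ disk k) with ho
  have hnodi : ints.Nodup := (List.nodup_range).filter _
  have hnodo : others.Nodup := (List.nodup_range).filter _
  have hlen1 : ∀ g ts s, (pvScat g ts s (List.replicate n (0 : Int))).length = n := by
    intro g ts s; rw [pvScat_length, List.length_replicate]
  apply List.ext_getElem?
  intro k
  by_cases hk : k < n
  · have hlenA : (pvScat (fun p => PySem.List.pyGetD order ((n : Int) - 1 - p) 0) others 0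
        (pvScat (fun p => PySem.List.pyGetD order p 0) ints 0 (List.replicate n (0 : Int)))).length = n := by
      rw [pvScat_length, hlen1]
    by_cases hqk : pvQ disk k
    · have hko : k ∉ others := by
        intro h; have := List.of_mem_filter h; simp [hqk] at this
      have hki : k ∈ ints := List.mem_filter.mpr ⟨List.mem_range.mpr hk, hqk⟩
      rw [pvScat_get_not_mem _ _ _ _ _ hko]
      rw [pvScat_get_mem _ _ _ _ _ hnodi hki (by rw [List.length_replicate]; exact hk)]
      rw [List.getElem?_map, List.getElem?_range hk]
      simp only [Nat.zero_add, Option.map_some]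
      congr 1
      rw [hi, pvIdxOf_filter_range _ _ _ hk hqk, PySem.List.pyGetD_natCast]
      simp [pvF, hqk, pvCnt]
    · have hki : k ∉ ints := by
        intro h; have := List.of_mem_filter h; simp [hqk] at this
      have hko : k ∈ others := List.mem_filter.mpr ⟨List.mem_range.mpr hk, by simp [hqk]⟩
      rw [pvScat_get_mem _ _ _ _ _ hnodo hko (by rw [hlen1]; exact hk)]
      rw [List.getElem?_map, List.getElem?_range hk]
      simp only [Nat.zero_add, Option.map_some]
      congr 1
      rw [ho, pvIdxOf_filter_range _ _ _ hk (by simp [hqk])]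
      have hcn : (List.range k).countP (fun j => !pvQ disk j) = pvCntN disk k := rfl
      rw [hcn]
      have hle : pvCntN disk k ≤ k := pvCntN_le disk k
      have hcast : (n : Int) - 1 - (pvCntN disk k : Int) = ((n - 1 - pvCntN disk k : Nat) : Int) := by omega
      rw [hcast, PySem.List.pyGetD_natCast]
      simp [pvF, hqk, hn]
  · have h1 : ((List.range n).map (pvF disk order))[k]? = none := by
      rw [List.getElem?_eq_none_iff]; simpa using Nat.le_of_not_lt hk
    have h2 : (pvScat (fun p => PySem.List.pyGetD order ((n : Int) - 1 - p) 0) others 0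
        (pvScat (fun p => PySem.List.pyGetD order p 0) ints 0 (List.replicate n (0 : Int))))[k]? = none := by
      rw [List.getElem?_eq_none_iff, pvScat_length, hlen1]
      exact Nat.le_of_not_lt hk
    rw [h1, h2]

-- ===== VERDICT (by name: the statement is the Claim_ definition above) =====
theorem move_partial_spec : Claim_equal_move_partial := by
  intro disk order _ _
  unfold Spec_move_partial
  rw [pvA_eq_map, pvB_eq_map]
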